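-- pv_equiv track=rewrite | github.com/saumyaojha1407/ds_algo | top_k_freq.py | max_freq_word
-- ===== SOURCE A (Python) =====
-- def max_freq_word(list_of_words, k):
--     dict_words = {}
--     for word in list_of_words:
--         if word.lower() in dict_words:
--             dict_words[word.lower()] += 1
--         else:
--             dict_words[word.lower()] = 1
--     max_freq = 0
--     output_word = []
--     # dict_words = dict(sorted(dict_words.items(), key=lambda item: item[1], reverse=True))
--     for key, value in dict_words.items():
--         if k:
--             output_word.append(key)
--             k -= 1
--         else:
--             break
--
--     return output_word
-- ===== SOURCE B (Python) =====
-- def max_freq_word(list_of_words, k):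
--     seen = set()
--     output = []
--     for word in list_of_words:
--         w = word.lower()
--         if w not in seen:
--             if not k:
--                 break
--             seen.add(w)
--             output.append(w)
--             k -= 1
--     return output
-- ===== Notes on version B (the rewrite author's own statement) =====
-- stated objective: simpler
-- what changed: Replaces A's two-pass scheme (build a full lowercase frequency dict, then walk its keys taking k) with a single pass keeping a seen-set and taking the first k distinct lowercased words directly, short-circuiting as soon as k is exhausted.
import Mathlib
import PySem

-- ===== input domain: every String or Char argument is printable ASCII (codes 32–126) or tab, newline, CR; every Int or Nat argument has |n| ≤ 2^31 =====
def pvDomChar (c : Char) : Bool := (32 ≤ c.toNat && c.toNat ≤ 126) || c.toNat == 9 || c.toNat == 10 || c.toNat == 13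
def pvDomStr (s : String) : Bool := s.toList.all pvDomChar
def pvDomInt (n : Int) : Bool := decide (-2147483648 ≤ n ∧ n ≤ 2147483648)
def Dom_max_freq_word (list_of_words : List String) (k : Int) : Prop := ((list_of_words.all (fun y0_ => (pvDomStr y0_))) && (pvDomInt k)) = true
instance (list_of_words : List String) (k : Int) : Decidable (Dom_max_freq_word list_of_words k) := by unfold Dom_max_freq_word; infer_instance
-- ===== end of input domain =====

-- B replaces A's two-pass scheme (frequency dict, then take k keys) with one pass over the
-- words keeping a seen-set and taking the first k distinct lowercased words (objective: simpler).

-- ===== PORT A =====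
-- the second loop of A: 'for key, value in dict_words.items(): if k: output.append(key); k -= 1 else: break'
def pvTakeLoopA : List (String × Int) → Int → List String → List String
  | [], _, output => output
  | (key, _) :: rest, k, output =>
      if k ≠ 0 then pvTakeLoopA rest (k - 1) (output ++ [key]) else output

def max_freq_word (list_of_words : List String) (k : Int) : List String :=
  let dict_words : PySem.Dict String Int :=
    list_of_words.foldl
      (fun d word =>
        if d.contains (PySem.Str.lower word) then
          d.insert (PySem.Str.lower word) (d.getD (PySem.Str.lower word) 0 + 1)
        else
          d.insert (PySem.Str.lower word) 1)
      PySem.Dict.empty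
  pvTakeLoopA dict_words.items k []

-- ===== PORT B =====
-- B's single loop: seen-set + output accumulator + countdown
def pvGoB : List String → PySem.Set String → List String → Int → List String
  | [], _, output, _ => output
  | word :: rest, seen, output, k =>
      let w := PySem.Str.lower word
      if PySem.Set.contains seen w then
        pvGoB rest seen output k
      else if k = 0 then
        output
      else
        pvGoB rest (PySem.Set.add seen w) (output ++ [w]) (k - 1)

def max_freq_word_alt (list_of_words : List String) (k : Int) : List String :=
  pvGoB list_of_words PySem.Set.empty [] k

-- ===== PRECONDITION & SPEC =====
def Spec_max_freq_word (list_of_words : List String) (k : Int) (out : List String) : Prop := out = max_freq_word_alt list_of_words k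
instance (list_of_words : List String) (k : Int) (out : List String) : Decidable (Spec_max_freq_word list_of_words k out) := by unfold Spec_max_freq_word; infer_instance

-- ===== CLAIM (what is proved, stated in full; the proofs are below) =====
def Claim_equal_max_freq_word : Prop := ∀ (list_of_words : List String) (k : Int), Dom_max_freq_word list_of_words k → Spec_max_freq_word list_of_words k (max_freq_word list_of_words k)

-- ===== LEMMAS AND PROOFS =====

-- 'take the first k entries' as a plain function, the common shape both loops reduce to
def pvTakeK : Int → List String → List String
  | _, [] => []
  | k, x :: rest => if k ≠ 0 then x :: pvTakeK (k - 1) rest else []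

-- the lowered words not yet in 'seen', in first-occurrence order
def pvFresh : PySem.Set String → List String → List String
  | _, [] => []
  | seen, word :: rest =>
      let w := PySem.Str.lower word
      if PySem.Set.contains seen w then pvFresh seen rest
      else w :: pvFresh (PySem.Set.add seen w) rest

theorem pvTakeLoopA_eq (items : List (String × Int)) :
    ∀ (k : Int) (out : List String),
      pvTakeLoopA items k out = out ++ pvTakeK k (items.map Prod.fst) := by
  induction items with
  | nil => intro k out; simp [pvTakeLoopA, pvTakeK]
  | cons p rest ih =>
      intro k out
      obtain ⟨key, v⟩ := p
      by_cases hk : k = 0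
      · simp [pvTakeLoopA, pvTakeK, hk]
      · simp [pvTakeLoopA, pvTakeK, hk, ih]

theorem pvGoB_eq (ws : List String) :
    ∀ (seen : PySem.Set String) (out : List String) (k : Int),
      pvGoB ws seen out k = out ++ pvTakeK k (pvFresh seen ws) := by
  induction ws with
  | nil => intro seen out k; simp [pvGoB, pvFresh, pvTakeK]
  | cons word rest ih =>
      intro seen out k
      by_cases hs : PySem.Str.lower word ∈ seen
      · simp [pvGoB, pvFresh, PySem.Set.contains, hs, ih]
      · by_cases hk : k = 0
        · simp [pvGoB, pvFresh, pvTakeK, PySem.Set.contains, hs, hk]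
        · simp [pvGoB, pvFresh, pvTakeK, PySem.Set.contains, hs, hk, ih]

-- A's dict keys after the counting loop: Set.update of the lowered words
theorem keysA_eq (ws : List String) :
    ∀ (d : PySem.Dict String Int),
      (ws.foldl
        (fun d word =>
          if d.contains (PySem.Str.lower word) then
            d.insert (PySem.Str.lower word) (d.getD (PySem.Str.lower word) 0 + 1)
          else
            d.insert (PySem.Str.lower word) 1)
        d).keys = PySem.Set.update d.keys (ws.map PySem.Str.lower) := by
  induction ws with
  | nil => intro d; simp [PySem.Set.update]
  | cons word rest ih =>
      intro d
      by_cases hc : d.contains (PySem.Str.lower word)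
      · have hmem : PySem.Str.lower word ∈ d.keys := by
          exact (PySem.Dict.contains_iff_mem_keys (d := d) (k := PySem.Str.lower word)).mp hc
        have hk1 := PySem.Dict.keys_insert_of_contains d
          (d.getD (PySem.Str.lower word) 0 + 1) hc
        simp [List.foldl, hc, ih, PySem.Set.update, hk1, PySem.Set.add,
          PySem.Set.contains, hmem]
      · have hmem : PySem.Str.lower word ∉ d.keys := by
          intro h
          exact hc ((PySem.Dict.contains_iff_mem_keys (d := d) (k := PySem.Str.lower word)).mpr h)
        have hk1 := PySem.Dict.keys_insert_of_not_contains d (1 : Int) (by simpa using hc)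
        simp [List.foldl, hc, ih, PySem.Set.update, hk1, PySem.Set.add,
          PySem.Set.contains, hmem]

-- Set.update decomposes as the old set ++ the fresh lowered words
theorem update_eq_append_fresh (ws : List String) :
    ∀ (seen : PySem.Set String),
      PySem.Set.update seen (ws.map PySem.Str.lower) = seen ++ pvFresh seen ws := by
  induction ws with
  | nil => intro seen; simp [PySem.Set.update, pvFresh]
  | cons word rest ih =>
      intro seen
      by_cases hs : PySem.Str.lower word ∈ seen
      · have hadd : PySem.Set.add seen (PySem.Str.lower word) = seen := by
          simp [PySem.Set.add, PySem.Set.contains, hs]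
        simp only [PySem.Set.update, List.map, List.foldl, pvFresh] at *
        rw [hadd]
        simp [PySem.Set.contains, hs]
        exact ih seen
      · have hadd : PySem.Set.add seen (PySem.Str.lower word) = seen ++ [PySem.Str.lower word] := by
          simp [PySem.Set.add, PySem.Set.contains, hs]
        simp only [PySem.Set.update, List.map, List.foldl, pvFresh] at *
        rw [hadd]
        have h2 := ih (seen ++ [PySem.Str.lower word])
        rw [h2]
        simp [PySem.Set.contains, hs]

theorem dict_keys_items_fst (d : PySem.Dict String Int) : d.items.map Prod.fst = d.keys := by
  rfl

-- ===== VERDICT (by name: the statement is the Claim_ definition above) =====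
theorem max_freq_word_spec : Claim_equal_max_freq_word := by
  intro ws k _
  unfold Spec_max_freq_word max_freq_word max_freq_word_alt
  rw [pvTakeLoopA_eq, pvGoB_eq, dict_keys_items_fst, keysA_eq]
  have h := update_eq_append_fresh ws PySem.Set.empty
  simp [PySem.Set.empty] at h ⊢
  rw [h]
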